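-- pv_equiv track=rewrite | github.com/ZhixiuYe/HSCRF-pytorch | model/utils.py | CRFtag_to_SCRFtag
-- ===== SOURCE A (Python) =====
-- def CRFtag_to_SCRFtag(inputs):
--     alltags = []
--     for input in inputs:
--         tags = []
--         beg = 0
--         oldtag = '<START>'
--         for i, tag in enumerate(input):
--             if tag == u'O':
--                 tags.append((i, i, oldtag, tag))
--                 oldtag = tag
--             if tag[0] == u'S':
--                 tags.append((i, i, oldtag, tag[2:]))
--                 oldtag = tag[2:]
--             if tag[0] == u'B':
--                 beg = i
--             if tag[0] == u'E':
--                 tags.append((beg, i, oldtag, tag[2:]))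
--                 oldtag = tag[2:]
--         alltags.append(tags)
--     return alltags
-- ===== SOURCE B (Python) =====
-- def CRFtag_to_SCRFtag(inputs):
--     alltags = []
--     for input in inputs:
--         # pass 1: extract span entries (start, end, label) without any source-label state
--         entries = []
--         beg = 0
--         for i, tag in enumerate(input):
--             if tag == 'O':
--                 entries.append((i, i, tag))
--             elif tag[0] == 'S':
--                 entries.append((i, i, tag[2:]))
--             elif tag[0] == 'B':
--                 beg = i
--             elif tag[0] == 'E':
--                 entries.append((beg, i, tag[2:]))
--         # pass 2: thread the source label ('<START>', then each prior entry's label)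
--         tags = []
--         prev = '<START>'
--         for (l, r, lab) in entries:
--             tags.append((l, r, prev, lab))
--             prev = lab
--         alltags.append(tags)
--     return alltags
-- ===== Notes on version B (the rewrite author's own statement) =====
-- stated objective: alternative
-- what changed: B splits A's single stateful scan into two passes: one pass extracts span entries (start, end, label) with no carried source-label state, a second pass threads the '<START>'/previous-label chain through the entry list, eliminating A's oldtag variable and its interleaved updates.
import Mathlib
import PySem

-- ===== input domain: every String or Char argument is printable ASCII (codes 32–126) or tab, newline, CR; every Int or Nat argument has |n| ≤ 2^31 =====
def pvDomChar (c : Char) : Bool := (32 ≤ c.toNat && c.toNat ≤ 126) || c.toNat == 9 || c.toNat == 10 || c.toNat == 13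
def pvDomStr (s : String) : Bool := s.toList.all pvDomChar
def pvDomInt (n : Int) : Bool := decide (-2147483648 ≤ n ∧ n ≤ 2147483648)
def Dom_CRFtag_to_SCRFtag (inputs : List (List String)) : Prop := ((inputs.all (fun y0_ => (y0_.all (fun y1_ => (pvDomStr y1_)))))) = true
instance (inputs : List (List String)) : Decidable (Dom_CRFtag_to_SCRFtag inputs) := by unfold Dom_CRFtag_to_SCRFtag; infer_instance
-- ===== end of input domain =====

-- B replaces A's single scan with carried oldtag state by two passes (span extraction,
-- then source-label threading); alternative decomposition, same cost.


-- tag[2:] (Python slicing never raises)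
def pvSub2 (tag : String) : String := PySem.Str.slice tag (some 2) none

-- ===== PORT A =====
-- A's inner loop body: sequential independent ifs over the carried (tags, beg, oldtag) state.
def pvStepA (st : List (Int × Int × String × String) × Int × String) (p : Int × String) :
    List (Int × Int × String × String) × Int × String :=
  let i := p.1
  let tag := p.2
  let (tags, beg, oldtag) := st
  let (tags, oldtag) :=
    if tag = "O" then (tags ++ [(i, i, oldtag, tag)], tag) else (tags, oldtag)
  let (tags, oldtag) :=
    if PySem.Str.pyGet? tag 0 = some 'S' then (tags ++ [(i, i, oldtag, pvSub2 tag)], pvSub2 tag)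
    else (tags, oldtag)
  let beg := if PySem.Str.pyGet? tag 0 = some 'B' then i else beg
  let (tags, oldtag) :=
    if PySem.Str.pyGet? tag 0 = some 'E' then (tags ++ [(beg, i, oldtag, pvSub2 tag)], pvSub2 tag)
    else (tags, oldtag)
  (tags, beg, oldtag)

def CRFtag_to_SCRFtag (inputs : List (List String)) : List (List (Int × Int × String × String)) :=
  inputs.foldl
    (fun alltags input =>
      alltags ++ [((PySem.List.enumerate input).foldl pvStepA ([], 0, "<START>")).1])
    []

-- ===== PORT B =====
-- pass 1: span extraction, state = (entries, beg), no source-label state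
def pvCollectB (st : List (Int × Int × String) × Int) (p : Int × String) :
    List (Int × Int × String) × Int :=
  let i := p.1
  let tag := p.2
  if tag = "O" then (st.1 ++ [(i, i, tag)], st.2)
  else if PySem.Str.pyGet? tag 0 = some 'S' then (st.1 ++ [(i, i, pvSub2 tag)], st.2)
  else if PySem.Str.pyGet? tag 0 = some 'B' then (st.1, i)
  else if PySem.Str.pyGet? tag 0 = some 'E' then (st.1 ++ [(st.2, i, pvSub2 tag)], st.2)
  else st

-- pass 2: thread the source label down the entry chain
def pvThreadB (st : List (Int × Int × String × String) × String) (e : Int × Int × String) :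
    List (Int × Int × String × String) × String :=
  (st.1 ++ [(e.1, e.2.1, st.2, e.2.2)], e.2.2)

def CRFtag_to_SCRFtag_alt (inputs : List (List String)) : List (List (Int × Int × String × String)) :=
  inputs.map (fun input =>
    let entries := ((PySem.List.enumerate input).foldl pvCollectB ([], 0)).1
    (entries.foldl pvThreadB ([], "<START>")).1)

-- ===== PRECONDITION & SPEC =====
-- Pre_ excludes sequences containing the empty-string tag, on which the Python A
-- (and B alike) raises IndexError at tag[0].
def Pre_CRFtag_to_SCRFtag (inputs : List (List String)) : Prop :=
  ∀ input ∈ inputs, ∀ tag ∈ input, tag ≠ ""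
instance (inputs : List (List String)) : Decidable (Pre_CRFtag_to_SCRFtag inputs) := by
  unfold Pre_CRFtag_to_SCRFtag; infer_instance

def pvWitness_CRFtag_to_SCRFtag : List (List String) := [["O", "B-PER", "E-PER", "S-LOC"]]

def Spec_CRFtag_to_SCRFtag (inputs : List (List String)) (out : List (List (Int × Int × String × String))) : Prop := out = CRFtag_to_SCRFtag_alt inputs
instance (inputs : List (List String)) (out : List (List (Int × Int × String × String))) : Decidable (Spec_CRFtag_to_SCRFtag inputs out) := by unfold Spec_CRFtag_to_SCRFtag; infer_instance

-- ===== CLAIM (what is proved, stated in full; the proofs are below) =====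
def Claim_equal_CRFtag_to_SCRFtag : Prop := ∀ (inputs : List (List String)), Dom_CRFtag_to_SCRFtag inputs → Pre_CRFtag_to_SCRFtag inputs → Spec_CRFtag_to_SCRFtag inputs (CRFtag_to_SCRFtag inputs)

-- ===== LEMMAS AND PROOFS =====

-- the value of pass 2 as a structural function, and the last label of an entry list
def pvThread : List (Int × Int × String) → String → List (Int × Int × String × String)
  | [], _ => []
  | e :: es, prev => (e.1, e.2.1, prev, e.2.2) :: pvThread es e.2.2

def pvLast (es : List (Int × Int × String)) (prev : String) : String :=
  es.foldl (fun _ e => e.2.2) prev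

theorem pvLast_cons (e : Int × Int × String) (es : List (Int × Int × String)) (prev : String) :
    pvLast (e :: es) prev = pvLast es e.2.2 := rfl

theorem pvLast_append_single (es : List (Int × Int × String)) (e : Int × Int × String)
    (prev : String) : pvLast (es ++ [e]) prev = e.2.2 := by
  induction es generalizing prev with
  | nil => rfl
  | cons a t ih => simpa [pvLast_cons] using ih a.2.2

theorem pvThread_append_single (es : List (Int × Int × String)) (e : Int × Int × String)
    (prev : String) :
    pvThread (es ++ [e]) prev = pvThread es prev ++ [(e.1, e.2.1, pvLast es prev, e.2.2)] := by
  induction es generalizing prev with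
  | nil => rfl
  | cons a t ih => simp [pvThread, pvLast_cons, ih]

theorem pvThreadB_foldl (es : List (Int × Int × String))
    (acc : List (Int × Int × String × String)) (prev : String) :
    es.foldl pvThreadB (acc, prev) = (acc ++ pvThread es prev, pvLast es prev) := by
  induction es generalizing acc prev with
  | nil => simp [pvThread, pvLast]
  | cons e t ih => simp [pvThreadB, pvThread, pvLast_cons, ih]

-- main invariant: A's fold over the enumerated tags, started from the threaded image of
-- B's pass-1 state, stays the threaded image of B's pass-1 fold.
theorem pvMain (l : List (Int × String)) (es : List (Int × Int × String)) (beg : Int)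
    (prev : String) :
    l.foldl pvStepA (pvThread es prev, beg, pvLast es prev) =
      (pvThread (l.foldl pvCollectB (es, beg)).1 prev,
       (l.foldl pvCollectB (es, beg)).2,
       pvLast (l.foldl pvCollectB (es, beg)).1 prev) := by
  induction l generalizing es beg with
  | nil => rfl
  | cons p t ih =>
    rcases p with ⟨i, tag⟩
    by_cases hO : tag = "O"
    · subst hO
      have h1 : pvStepA (pvThread es prev, beg, pvLast es prev) (i, "O")
          = (pvThread (es ++ [(i, i, "O")]) prev, beg, pvLast (es ++ [(i, i, "O")]) prev) := by
        simp [pvStepA, pvThread_append_single, pvLast_append_single]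
      have h2 : pvCollectB (es, beg) (i, "O") = (es ++ [(i, i, "O")], beg) := by
        simp [pvCollectB]
      simp only [List.foldl_cons, h1, h2]
      exact ih (es ++ [(i, i, "O")]) beg
    · by_cases hS : PySem.List.pyGet? tag.toList 0 = some 'S'
      · have hB : ¬ PySem.List.pyGet? tag.toList 0 = some 'B' := by simp [hS]
        have hE : ¬ PySem.List.pyGet? tag.toList 0 = some 'E' := by simp [hS]
        have h1 : pvStepA (pvThread es prev, beg, pvLast es prev) (i, tag)
            = (pvThread (es ++ [(i, i, pvSub2 tag)]) prev, beg,
               pvLast (es ++ [(i, i, pvSub2 tag)]) prev) := by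
          simp [pvStepA, hO, hS, pvThread_append_single, pvLast_append_single]
        have h2 : pvCollectB (es, beg) (i, tag) = (es ++ [(i, i, pvSub2 tag)], beg) := by
          simp [pvCollectB, hO, hS]
        simp only [List.foldl_cons, h1, h2]
        exact ih _ beg
      · by_cases hB : PySem.List.pyGet? tag.toList 0 = some 'B'
        · have hE : ¬ PySem.List.pyGet? tag.toList 0 = some 'E' := by simp [hB]
          have h1 : pvStepA (pvThread es prev, beg, pvLast es prev) (i, tag)
              = (pvThread es prev, i, pvLast es prev) := by
            simp [pvStepA, hO, hB]
          have h2 : pvCollectB (es, beg) (i, tag) = (es, i) := by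
            simp [pvCollectB, hO, hB]
          simp only [List.foldl_cons, h1, h2]
          exact ih es i
        · by_cases hE : PySem.List.pyGet? tag.toList 0 = some 'E'
          · have h1 : pvStepA (pvThread es prev, beg, pvLast es prev) (i, tag)
                = (pvThread (es ++ [(beg, i, pvSub2 tag)]) prev, beg,
                   pvLast (es ++ [(beg, i, pvSub2 tag)]) prev) := by
              simp [pvStepA, hO, hE, pvThread_append_single, pvLast_append_single]
            have h2 : pvCollectB (es, beg) (i, tag) = (es ++ [(beg, i, pvSub2 tag)], beg) := by
              simp [pvCollectB, hO, hE]
            simp only [List.foldl_cons, h1, h2]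
            exact ih _ beg
          · have h1 : pvStepA (pvThread es prev, beg, pvLast es prev) (i, tag)
                = (pvThread es prev, beg, pvLast es prev) := by
              simp [pvStepA, hO, hS, hB, hE]
            have h2 : pvCollectB (es, beg) (i, tag) = (es, beg) := by
              simp [pvCollectB, hO, hS, hB, hE]
            simp only [List.foldl_cons, h1, h2]
            exact ih es beg

-- per-sequence equality
theorem pvInner (input : List String) :
    ((PySem.List.enumerate input).foldl pvStepA ([], 0, "<START>")).1 =
      ((((PySem.List.enumerate input).foldl pvCollectB ([], 0)).1).foldl pvThreadB
        ([], "<START>")).1 := by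
  have h := pvMain (PySem.List.enumerate input) [] 0 "<START>"
  rw [show pvThread [] "<START>" = [] from rfl, show pvLast [] "<START>" = "<START>" from rfl] at h
  rw [h, pvThreadB_foldl]
  simp

-- the outer append-loop of A is the map of B
theorem pvOuter (inputs : List (List String))
    (acc : List (List (Int × Int × String × String))) :
    inputs.foldl
      (fun alltags input =>
        alltags ++ [((PySem.List.enumerate input).foldl pvStepA ([], 0, "<START>")).1]) acc =
    acc ++ inputs.map (fun input =>
      let entries := ((PySem.List.enumerate input).foldl pvCollectB ([], 0)).1
      (entries.foldl pvThreadB ([], "<START>")).1) := by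
  induction inputs generalizing acc with
  | nil => simp
  | cons x t ih => simp [ih, pvInner x]

-- ===== VERDICT (by name: the statement is the Claim_ definition above) =====
theorem CRFtag_to_SCRFtag_spec : Claim_equal_CRFtag_to_SCRFtag := by
  intro inputs _ _
  unfold Spec_CRFtag_to_SCRFtag CRFtag_to_SCRFtag CRFtag_to_SCRFtag_alt
  simpa using pvOuter inputs []
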